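-- pv_equiv track=rewrite | github.com/CraftNobody0505/PythonCodingChallenges | PythonCodingChallenges.py | find_longest_ascending_substring
-- ===== SOURCE A (Python) =====
-- def find_longest_ascending_substring(s):
--     """
--     查找字符串中单个最长的相邻字符正序子串。
--     "正序" 指的是严格递增，例如 "ac" (ord('c') > ord('a'))。 "aa" 不是。
--     """
--     if not s:
--         return ""
--
--     max_substring = ""
--     current_substring = ""
--
--     for char in s:
--         if not current_substring or ord(char) > ord(current_substring[-1]):
--             current_substring += char
--         else:
--             # 当前字符不大于前一个字符，正序中断
--             if len(current_substring) > len(max_substring):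
--                 max_substring = current_substring
--             # 开始新的子串，以当前字符开头 (如果当前字符和前一个相同，则新子串从当前字符开始)
--             # 如果当前字符小于前一个，也从当前字符开始
--             current_substring = char
--             # 修正：如果 aa, current_substring 会是 "a", 然后又 "a"
--             # 如果是"cba", current_substring 会是 "c", max_substring="c"
--             # 然后 current_substring="b", max_substring="c"
--             # 然后 current_substring="a", max_substring="c"
--             # 这一逻辑在之前是：
--             # # 开始新的子串，以当前字符开头
--             # current_substring = char
--             # 但如果遇到 "aa", 它应该中断。
--             # "aa" 不是正序。 "ab" 是。
--             # if "aa", char='a', current_substring[-1]='a'. ord(char) > ord(current_substring[-1]) is False.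
--             # So, it goes to else. max_substring (if "a" was previous) is "a".
--             # current_substring becomes "a". This is correct. "aa" won't form "aa".
--
--     # 循环结束后，最后检查一次 current_substring
--     if len(current_substring) > len(max_substring):
--         max_substring = current_substring
--
--     # 如果最长子串只有一个字符，且原字符串不为空，这是有效的。
--     # (例如 "zyxwv", 最长的是 "z" (或 "y" or "x"...), 我的代码会返回 "z")
--     # 题目说 "ac" is正序, "aa" is not. This implies a length of at least 2 for "正序子串".
--     # 但如果找不到长度>=2的，最长的就是单个字符。
--     # 如果题目严格要求正序子串长度必须 >= 2，则需要在这里加判断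
--     # if len(max_substring) < 2: return ""
--     # 但通常这种问题，单个字符也被视为长度为1的子串。
--     # 鉴于 "aa" 不是，那么单个字符 "a" 本身也不是 "正序子串" 的典型例子，
--     # 但它是一个子串，并且是 "最长的" (如果没有更长的)。
--     # 为了清晰，如果找不到长度大于1的正序子串，返回空字符串或第一个字符。
--     # 样例输出是 "abcdefg"，长度远大于1。
--     # Let's assume a single character is a valid (though trivial) "longest" if no longer sequence exists.
--     # The current logic correctly handles finding sequences like "abc". If only "cba" exists, it finds "c".
--
--     return max_substring
-- ===== SOURCE B (Python) =====
-- def find_longest_ascending_substring(s):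
--     # DP from the right: asc[i] = length of the strictly-ascending run starting at i;
--     # then pick the first index of maximal asc and slice it out.
--     n = len(s)
--     asc = [1] * n
--     for i in range(n - 2, -1, -1):
--         if ord(s[i]) < ord(s[i + 1]):
--             asc[i] = asc[i + 1] + 1
--     best = 0
--     start = 0
--     for i, L in enumerate(asc):
--         if L > best:
--             best, start = L, i
--     return s[start:start + best]
-- ===== Notes on version B (the rewrite author's own statement) =====
-- stated objective: alternative
-- what changed: A accumulates (max,current) substrings in one forward scan; B computes a right-to-left DP array asc[i] = length of the ascending run starting at i, then an argmax pass picks the first index of maximal asc and the answer is sliced out of s.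
import Mathlib
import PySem

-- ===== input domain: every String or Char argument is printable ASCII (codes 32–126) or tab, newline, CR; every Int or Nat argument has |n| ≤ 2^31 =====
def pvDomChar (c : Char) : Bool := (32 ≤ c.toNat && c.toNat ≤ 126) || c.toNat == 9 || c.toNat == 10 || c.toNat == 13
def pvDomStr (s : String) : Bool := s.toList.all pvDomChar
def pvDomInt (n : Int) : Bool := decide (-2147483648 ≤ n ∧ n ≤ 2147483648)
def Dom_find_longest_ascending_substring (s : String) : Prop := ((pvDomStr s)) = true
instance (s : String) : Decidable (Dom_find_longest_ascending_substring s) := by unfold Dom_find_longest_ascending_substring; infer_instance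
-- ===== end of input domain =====

-- B replaces A's fused forward scan carrying (max,current) substrings by a right-to-left
-- DP array asc (run length starting at each index), an argmax pass and one slice;
-- alternative decomposition, same cost. Return values proved equal on all inputs.


-- ===== PORT A =====
-- A's loop body: extend current run, or close it (updating max) and restart at c.
def pvStepA (p : List Char × List Char) (c : Char) : List Char × List Char :=
  if p.2 = [] ∨ (p.2.getLast?.getD ' ').toNat < c.toNat then (p.1, p.2 ++ [c])
  else (if p.2.length > p.1.length then (p.2, [c]) else (p.1, [c]))

def find_longest_ascending_substring (s : String) : String :=
  if s.toList = [] then ""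
  else
    let st := s.toList.foldl pvStepA ([], [])
    String.ofList (if st.2.length > st.1.length then st.2 else st.1)

-- ===== PORT B =====
-- asc[i] = length of the strictly-ascending run starting at i; the Python backward
-- array loop asc[i] = asc[i+1]+1 is ported as the same recurrence, right to left.
def pvAsc : List Char → List Nat
  | [] => []
  | [_] => [1]
  | a :: b :: t => (if a.toNat < b.toNat then (pvAsc (b :: t)).headD 1 + 1 else 1) :: pvAsc (b :: t)

-- argmax step: state (best, start); `if L > best: best, start = L, i`
def pvArg (p : Nat × Int) (e : Int × Nat) : Nat × Int := if e.2 > p.1 then (e.2, e.1) else p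

def find_longest_ascending_substring_alt (s : String) : String :=
  let asc := pvAsc s.toList
  let st := (PySem.List.enumerate asc 0).foldl pvArg (0, 0)
  PySem.Str.slice s (some st.2) (some (st.2 + (st.1 : Int)))

-- ===== PRECONDITION & SPEC =====
def Spec_find_longest_ascending_substring (s : String) (out : String) : Prop := out = find_longest_ascending_substring_alt s
instance (s : String) (out : String) : Decidable (Spec_find_longest_ascending_substring s out) := by unfold Spec_find_longest_ascending_substring; infer_instance

-- ===== CLAIM (what is proved, stated in full; the proofs are below) =====
def Claim_equal_find_longest_ascending_substring : Prop := ∀ (s : String), Dom_find_longest_ascending_substring s → Spec_find_longest_ascending_substring s (find_longest_ascending_substring s)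

-- ===== LEMMAS AND PROOFS =====

-- the list of maximal strictly-ascending runs of `cur ++ rest`, `cur` the open run
def pvRuns (cur : List Char) : List Char → List (List Char)
  | [] => [cur]
  | c :: t =>
    if c.toNat ≤ (cur.getLast?.getD ' ').toNat then cur :: pvRuns [c] t
    else pvRuns (cur ++ [c]) t

-- first longest (A's max update / B's selected run)
def pvPick (best r : List Char) : List Char :=
  if r.length > best.length then r else best

-- [n, n-1, …, 1]: the asc values inside one run of length n
def pvCntd : Nat → List Nat
  | 0 => []
  | n + 1 => (n + 1) :: pvCntd n

-- strictly ascending list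
def pvAscRun : List Char → Prop
  | [] => True
  | [_] => True
  | a :: b :: t => a.toNat < b.toNat ∧ pvAscRun (b :: t)

lemma pvAscRun_snoc : ∀ (cur : List Char) (c : Char), pvAscRun cur →
    (cur.getLast?.getD ' ').toNat < c.toNat → pvAscRun (cur ++ [c]) := by
  intro cur
  induction cur with
  | nil => intro c _ _; trivial
  | cons a cur ih =>
    intro c hasc hlt
    cases cur with
    | nil => exact ⟨by simpa using hlt, trivial⟩
    | cons b cur' =>
      exact ⟨hasc.1, ih c hasc.2 (by simpa [List.getLast?_cons_cons] using hlt)⟩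

lemma pvCntd_length (n : Nat) : (pvCntd n).length = n := by
  induction n with
  | zero => rfl
  | succ n ih => simp [pvCntd, ih]

-- asc of one closed run followed by the rest
lemma pvAsc_run : ∀ (cur rest : List Char), cur ≠ [] → pvAscRun cur →
    (∀ r, rest.head? = some r → r.toNat ≤ (cur.getLast?.getD ' ').toNat) →
    pvAsc (cur ++ rest) = pvCntd cur.length ++ pvAsc rest := by
  intro cur
  induction cur with
  | nil => intro rest h; exact absurd rfl h
  | cons a cur ih =>
    intro rest _ hasc hbrk
    cases cur with
    | nil =>
      cases rest with
      | nil => simp [pvAsc, pvCntd]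
      | cons r t =>
        have : ¬ a.toNat < r.toNat := by
          have := hbrk r rfl; simp at this; omega
        simp [pvAsc, pvCntd, this]
    | cons b cur' =>
      have hab := hasc.1
      have htail := ih rest (by simp) hasc.2
        (by intro r hr; simpa [List.getLast?_cons_cons] using hbrk r hr)
      have hlen : (b :: cur' ++ rest) = (b :: cur') ++ rest := rfl
      calc pvAsc ((a :: b :: cur') ++ rest)
          = (if a.toNat < b.toNat then (pvAsc ((b :: cur') ++ rest)).headD 1 + 1 else 1)
              :: pvAsc ((b :: cur') ++ rest) := by simp [pvAsc]
        _ = pvCntd (a :: b :: cur').length ++ pvAsc rest := by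
            rw [htail]
            simp [hab, pvCntd]

-- asc of the whole string is the concatenation of per-run countdowns
lemma pvAsc_runs : ∀ (rest cur : List Char), cur ≠ [] → pvAscRun cur →
    pvAsc (cur ++ rest) = (pvRuns cur rest).flatMap (fun r => pvCntd r.length) := by
  intro rest
  induction rest with
  | nil =>
    intro cur hne hasc
    simpa [pvRuns, pvAsc] using pvAsc_run cur [] hne hasc (by intro r h; simp at h)
  | cons c t ih =>
    intro cur hne hasc
    by_cases h : c.toNat ≤ (cur.getLast?.getD ' ').toNat
    · have h1 := pvAsc_run cur (c :: t) hne hasc (by intro r hr; simp only [List.head?_cons, Option.some.injEq] at hr; exact hr ▸ h)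
      have h2 : pvAsc (c :: t) = pvAsc ([c] ++ t) := rfl
      rw [pvRuns, if_pos h, List.flatMap_cons, h1, h2, ih [c] (by simp) trivial]
    · have hlt : (cur.getLast?.getD ' ').toNat < c.toNat := by omega
      have : cur ++ c :: t = (cur ++ [c]) ++ t := by simp
      rw [pvRuns, if_neg h, this, ih (cur ++ [c]) (by simp) (pvAscRun_snoc cur c hasc hlt)]

lemma pvRuns_flatten : ∀ (rest cur : List Char), (pvRuns cur rest).flatten = cur ++ rest := by
  intro rest
  induction rest with
  | nil => intro cur; simp [pvRuns]
  | cons c t ih =>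
    intro cur
    by_cases h : c.toNat ≤ (cur.getLast?.getD ' ').toNat
    · rw [pvRuns, if_pos h]; simp [ih [c]]
    · rw [pvRuns, if_neg h]; simp [ih (cur ++ [c])]

lemma pvRuns_ne_nil : ∀ (rest cur : List Char), cur ≠ [] → ∀ r ∈ pvRuns cur rest, r ≠ [] := by
  intro rest
  induction rest with
  | nil => intro cur hne r hr; simp [pvRuns] at hr; simpa [hr]
  | cons c t ih =>
    intro cur hne r hr
    by_cases h : c.toNat ≤ (cur.getLast?.getD ' ').toNat
    · rw [pvRuns, if_pos h] at hr
      rcases List.mem_cons.mp hr with hr1 | hr1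
      · simpa [hr1]
      · exact ih [c] (by simp) r hr1
    · rw [pvRuns, if_neg h] at hr
      exact ih (cur ++ [c]) (by simp) r hr

-- the argmax fold skips a countdown block whose maximum does not beat the best
lemma pvArg_skip : ∀ (n b : Nat) (st off : Int), n ≤ b →
    (PySem.List.enumerate (pvCntd n) off).foldl pvArg (b, st) = (b, st) := by
  intro n
  induction n with
  | zero => intro b st off _; simp [pvCntd, PySem.List.enumerate_nil]
  | succ n ih =>
    intro b st off h
    rw [pvCntd, PySem.List.enumerate_cons, List.foldl_cons]
    have : pvArg (b, st) (off, n + 1) = (b, st) := by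
      simp [pvArg]; omega
    rw [this, ih b st (off + 1) (by omega)]

-- … and moves to its start when it does
lemma pvArg_take (n b : Nat) (st off : Int) (h : b < n + 1) :
    (PySem.List.enumerate (pvCntd (n + 1)) off).foldl pvArg (b, st) = (n + 1, off) := by
  rw [pvCntd, PySem.List.enumerate_cons, List.foldl_cons]
  have : pvArg (b, st) (off, n + 1) = (n + 1, off) := by simp [pvArg]; omega
  rw [this, pvArg_skip n (n + 1) off (off + 1) (by omega)]

-- main selection invariant: the argmax over the countdown blocks, followed by the
-- slice, returns exactly the first longest run (pvPick fold)
lemma pvSelect : ∀ (R : List (List Char)), (∀ r ∈ R, r ≠ []) →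
    ∀ (pre : List Char) (b st : Nat), st + b ≤ pre.length →
    ∃ (b' st' : Nat),
      (PySem.List.enumerate (R.flatMap fun r => pvCntd r.length) (pre.length : Int)).foldl pvArg (b, (st : Int)) = (b', (st' : Int))
      ∧ st' + b' ≤ (pre ++ R.flatten).length
      ∧ ((pre ++ R.flatten).drop st').take b' = R.foldl pvPick ((pre.drop st).take b) := by
  intro R
  induction R with
  | nil =>
    intro _ pre b st hle
    exact ⟨b, st, by simp [PySem.List.enumerate_nil], by simpa using hle, by simp⟩
  | cons r R ih =>
    intro hne pre b st hle
    have hrne : r ≠ [] := hne r (by simp)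
    obtain ⟨m, hm⟩ : ∃ m, r.length = m + 1 := by
      cases r with
      | nil => exact absurd rfl hrne
      | cons x xs => exact ⟨xs.length, by simp⟩
    have hseedlen : ((pre.drop st).take b).length = b := by
      simp [List.length_take, List.length_drop]; omega
    rw [List.flatMap_cons, PySem.List.enumerate_append, List.foldl_append]
    by_cases hgt : b < r.length
    · -- the block wins: state becomes (r.length, pre.length)
      have hblock : (PySem.List.enumerate (pvCntd r.length) (pre.length : Int)).foldl pvArg (b, (st : Int)) = (r.length, (pre.length : Int)) := by
        rw [hm]; exact pvArg_take m b st (pre.length : Int) (by omega)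
      rw [hblock]
      have hoff : ((pre.length : Int) + ((pvCntd r.length).length : Int)) = (((pre ++ r).length : Nat) : Int) := by
        simp [pvCntd_length]
      obtain ⟨b', st', hfold, hbound, hpick⟩ :=
        ih (fun x hx => hne x (by simp [hx])) (pre ++ r) r.length pre.length (by simp)
      refine ⟨b', st', ?_, ?_, ?_⟩
      · rw [hoff]; exact hfold
      · simpa [List.append_assoc] using hbound
      · have hseed : (((pre ++ r).drop pre.length).take r.length) = r := by
          simp
        rw [hseed] at hpick
        rw [List.foldl_cons]
        have hpk : pvPick ((pre.drop st).take b) r = r := by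
          simp [pvPick, hseedlen]; omega
        rw [hpk]
        simpa [List.append_assoc] using hpick
    · -- the block loses: state unchanged
      have hskip : (PySem.List.enumerate (pvCntd r.length) (pre.length : Int)).foldl pvArg (b, (st : Int)) = (b, (st : Int)) :=
        pvArg_skip r.length b (st : Int) (pre.length : Int) (by omega)
      rw [hskip]
      have hoff : ((pre.length : Int) + ((pvCntd r.length).length : Int)) = (((pre ++ r).length : Nat) : Int) := by
        simp [pvCntd_length]
      obtain ⟨b', st', hfold, hbound, hpick⟩ :=
        ih (fun x hx => hne x (by simp [hx])) (pre ++ r) b st (by simp; omega)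
      refine ⟨b', st', ?_, ?_, ?_⟩
      · rw [hoff]; exact hfold
      · simpa [List.append_assoc] using hbound
      · have hseed : (((pre ++ r).drop st).take b) = (pre.drop st).take b := by
          rw [List.drop_append_of_le_length (by omega),
              List.take_append_of_le_length (by simp [List.length_drop]; omega)]
        rw [hseed] at hpick
        rw [List.foldl_cons]
        have hpk : pvPick ((pre.drop st).take b) r = (pre.drop st).take b := by
          simp [pvPick, hseedlen]; omega
        rw [hpk]
        simpa [List.append_assoc] using hpick

-- A's fused loop equals picking the longest over the runs, seeded with the running max
lemma pvA_eq_pick (rest : List Char) : ∀ (maxs cur : List Char), cur ≠ [] →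
    (let st := rest.foldl pvStepA (maxs, cur)
     if st.2.length > st.1.length then st.2 else st.1)
      = (pvRuns cur rest).foldl pvPick maxs := by
  induction rest with
  | nil => intro maxs cur _; simp [pvRuns, pvPick]
  | cons c t ih =>
    intro maxs cur hc
    by_cases h : c.toNat ≤ (cur.getLast?.getD ' ').toNat
    · have hA : pvStepA (maxs, cur) c
          = (if cur.length > maxs.length then cur else maxs, [c]) := by
        have : ¬ (cur.getLast?.getD ' ').toNat < c.toNat := by omega
        simp [pvStepA, hc, this]
        split <;> rfl
      simp only [pvRuns, h, if_pos, List.foldl_cons, hA]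
      rw [ih _ [c] (by simp)]
      by_cases hl : cur.length > maxs.length <;> simp [hl, pvPick]
    · have hA : pvStepA (maxs, cur) c = (maxs, cur ++ [c]) := by
        have : (cur.getLast?.getD ' ').toNat < c.toNat := by omega
        simp [pvStepA, this]
      simp only [pvRuns, h, List.foldl_cons, hA]
      exact ih _ (cur ++ [c]) (by simp)

-- ===== VERDICT (by name: the statement is the Claim_ definition above) =====
theorem find_longest_ascending_substring_spec : Claim_equal_find_longest_ascending_substring := by
  intro s _
  unfold Spec_find_longest_ascending_substring
  cases hs : s.toList with
  | nil =>
    have hA : find_longest_ascending_substring s = "" := by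
      simp [find_longest_ascending_substring, hs]
    have hB : find_longest_ascending_substring_alt s = "" := by
      rw [← String.toList_inj]
      simp [find_longest_ascending_substring_alt, hs, pvAsc, PySem.List.enumerate_nil,
        PySem.Str.toList_slice, PySem.Chars.slice_eq_listSlice, PySem.List.slice]
    rw [hA, hB]
  | cons c t =>
    -- B side: run the selection invariant over the runs of s
    have hasc : pvAsc (c :: t) = (pvRuns [c] t).flatMap (fun r => pvCntd r.length) := by
      simpa using pvAsc_runs t [c] (by simp) trivial
    have hflat : (pvRuns [c] t).flatten = c :: t := by simpa using pvRuns_flatten t [c]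
    obtain ⟨b', st', hfold, _, hpick⟩ :=
      pvSelect (pvRuns [c] t) (pvRuns_ne_nil t [c] (by simp)) [] 0 0 (by simp)
    simp only [List.length_nil, Nat.cast_zero, List.nil_append, List.drop_zero,
      List.take_zero, hflat] at hfold hpick
    have hB : find_longest_ascending_substring_alt s
        = String.ofList (((c :: t).drop st').take b') := by
      rw [← String.toList_inj]
      have hslice : (PySem.Str.slice s (some (st' : Int)) (some ((st' : Int) + (b' : Int)))).toList
          = ((c :: t).drop st').take b' := by
        rw [PySem.Str.toList_slice, PySem.Chars.slice_eq_listSlice, hs,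
          PySem.List.slice_natCast_add]
      simp only [find_longest_ascending_substring_alt, hs, hasc, hfold]
      simpa using hslice
    -- A side: the fused loop equals the pvPick fold over the same runs
    have hstepA : pvStepA ([], []) c = (([] : List Char), [c]) := by simp [pvStepA]
    have hA : find_longest_ascending_substring s
        = String.ofList ((pvRuns [c] t).foldl pvPick []) := by
      have h1 := pvA_eq_pick t [] [c] (by simp)
      simp only at h1
      simp [find_longest_ascending_substring, hs, List.foldl_cons, hstepA, h1]
    rw [hA, hB, hpick]
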